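-- pv_equiv track=rewrite | github.com/controlcoreio/control-core-012025 | cc-pap-api/app/middleware/security.py | validate_credentials
-- ===== SOURCE A (Python) =====
-- from typing import Dict, Optional, List, Tuple
--
-- def validate_credentials(credentials: Dict[str, any], auth_type: str) -> Tuple[bool, str]:
--     """Validate credentials based on auth type"""
--     if auth_type == "none":
--         return True, ""
--
--     if auth_type == "basic":
--         if "username" not in credentials or "password" not in credentials:
--             return False, "Basic auth requires username and password"
--
--     elif auth_type == "bearer":
--         if "token" not in credentials:
--             return False, "Bearer auth requires token"
--
--     elif auth_type == "oauth":
--         required_oauth_fields = ["client_id", "client_secret", "redirect_uri"]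
--         for field in required_oauth_fields:
--             if field not in credentials:
--                 return False, f"OAuth requires {field}"
--
--     elif auth_type == "api_key":
--         if "api_key" not in credentials:
--             return False, "API key auth requires api_key"
--
--     return True, ""
-- ===== SOURCE B (Python) =====
-- REQUIREMENTS = {
--     "basic": [("username", "Basic auth requires username and password"),
--               ("password", "Basic auth requires username and password")],
--     "bearer": [("token", "Bearer auth requires token")],
--     "oauth": [("client_id", "OAuth requires client_id"),
--               ("client_secret", "OAuth requires client_secret"),
--               ("redirect_uri", "OAuth requires redirect_uri")],
--     "api_key": [("api_key", "API key auth requires api_key")],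
-- }
--
-- def validate_credentials(credentials, auth_type):
--     for field, msg in REQUIREMENTS.get(auth_type, []):
--         if field not in credentials:
--             return False, msg
--     return True, ""
-- ===== Notes on version B (the rewrite author's own statement) =====
-- stated objective: idiomatic
-- what changed: Replaces the if/elif branch chain with a module-level table mapping each auth type to its ordered (required_field, message) pairs and one uniform loop over the looked-up list.
import Mathlib
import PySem

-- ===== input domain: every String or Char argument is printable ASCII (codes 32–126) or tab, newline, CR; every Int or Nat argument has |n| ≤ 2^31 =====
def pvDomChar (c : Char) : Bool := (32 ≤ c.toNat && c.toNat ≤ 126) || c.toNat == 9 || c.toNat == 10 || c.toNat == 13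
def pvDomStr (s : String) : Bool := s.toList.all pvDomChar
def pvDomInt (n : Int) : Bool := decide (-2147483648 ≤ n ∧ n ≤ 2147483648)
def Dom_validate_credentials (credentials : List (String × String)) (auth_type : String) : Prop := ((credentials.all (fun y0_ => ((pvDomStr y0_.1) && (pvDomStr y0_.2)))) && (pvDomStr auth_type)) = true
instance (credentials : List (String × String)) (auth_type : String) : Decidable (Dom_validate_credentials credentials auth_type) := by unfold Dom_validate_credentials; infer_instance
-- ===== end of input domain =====

-- B replaces A's if/elif branch chain by a data table (auth_type → required (field, message) pairs)
-- and one uniform loop; objective: more idiomatic, same cost.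

-- ===== PORT A =====
-- Python "k in credentials" (dict key membership)
def pvHasKey (credentials : List (String × String)) (k : String) : Bool :=
  credentials.any (fun p => p.1 == k)

-- the 'for field in required_oauth_fields' loop with its early return
def pvOauthLoop (credentials : List (String × String)) : List String → Bool × String
  | [] => (true, "")
  | f :: rest =>
    if !pvHasKey credentials f then (false, "OAuth requires " ++ f)
    else pvOauthLoop credentials rest

def validate_credentials (credentials : List (String × String)) (auth_type : String) : Bool × String :=
  if auth_type == "none" then (true, "")
  else if auth_type == "basic" then
    if !pvHasKey credentials "username" || !pvHasKey credentials "password" then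
      (false, "Basic auth requires username and password")
    else (true, "")
  else if auth_type == "bearer" then
    if !pvHasKey credentials "token" then (false, "Bearer auth requires token")
    else (true, "")
  else if auth_type == "oauth" then
    pvOauthLoop credentials ["client_id", "client_secret", "redirect_uri"]
  else if auth_type == "api_key" then
    if !pvHasKey credentials "api_key" then (false, "API key auth requires api_key")
    else (true, "")
  else (true, "")

-- ===== PORT B =====
def pvRequirements : PySem.Dict String (List (String × String)) :=
  PySem.Dict.ofList
    [("basic", [("username", "Basic auth requires username and password"),
                ("password", "Basic auth requires username and password")]),
     ("bearer", [("token", "Bearer auth requires token")]),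
     ("oauth", [("client_id", "OAuth requires client_id"),
                ("client_secret", "OAuth requires client_secret"),
                ("redirect_uri", "OAuth requires redirect_uri")]),
     ("api_key", [("api_key", "API key auth requires api_key")])]

-- the single 'for field, msg in …' loop with its early return
def pvCheckFields (credentials : List (String × String)) : List (String × String) → Bool × String
  | [] => (true, "")
  | (f, m) :: rest =>
    if !pvHasKey credentials f then (false, m)
    else pvCheckFields credentials rest

def validate_credentials_alt (credentials : List (String × String)) (auth_type : String) : Bool × String :=
  pvCheckFields credentials (pvRequirements.getD auth_type [])

-- ===== PRECONDITION & SPEC =====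
def Spec_validate_credentials (credentials : List (String × String)) (auth_type : String) (out : Bool × String) : Prop := out = validate_credentials_alt credentials auth_type
instance (credentials : List (String × String)) (auth_type : String) (out : Bool × String) : Decidable (Spec_validate_credentials credentials auth_type out) := by unfold Spec_validate_credentials; infer_instance

-- ===== CLAIM (what is proved, stated in full; the proofs are below) =====
def Claim_equal_validate_credentials : Prop := ∀ (credentials : List (String × String)) (auth_type : String), Dom_validate_credentials credentials auth_type → Spec_validate_credentials credentials auth_type (validate_credentials credentials auth_type)

-- ===== LEMMAS AND PROOFS =====

-- ===== VERDICT (by name: the statement is the Claim_ definition above) =====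
theorem validate_credentials_spec : Claim_equal_validate_credentials := by
  intro credentials auth_type _
  unfold Spec_validate_credentials validate_credentials validate_credentials_alt
  by_cases h0 : auth_type = "none"
  · subst h0; simp [pvCheckFields, show pvRequirements.getD "none" [] = [] from by decide]
  by_cases h1 : auth_type = "basic"
  · subst h1
    rw [show pvRequirements.getD "basic" [] =
        [("username", "Basic auth requires username and password"),
         ("password", "Basic auth requires username and password")] from by decide]
    cases hu : pvHasKey credentials "username" <;>
      cases hp : pvHasKey credentials "password" <;>
      simp_all [pvCheckFields]
  by_cases h2 : auth_type = "bearer"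
  · subst h2
    rw [show pvRequirements.getD "bearer" [] = [("token", "Bearer auth requires token")] from by decide]
    cases ht : pvHasKey credentials "token" <;> simp_all [pvCheckFields]
  by_cases h3 : auth_type = "oauth"
  · subst h3
    rw [show pvRequirements.getD "oauth" [] =
        [("client_id", "OAuth requires client_id"),
         ("client_secret", "OAuth requires client_secret"),
         ("redirect_uri", "OAuth requires redirect_uri")] from by decide]
    simp [pvOauthLoop, pvCheckFields]
  by_cases h4 : auth_type = "api_key"
  · subst h4
    rw [show pvRequirements.getD "api_key" [] = [("api_key", "API key auth requires api_key")] from by decide]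
    cases hk : pvHasKey credentials "api_key" <;> simp_all [pvCheckFields]
  · have b1 : ("basic" == auth_type) = false := beq_eq_false_iff_ne.mpr (Ne.symm h1)
    have b2 : ("bearer" == auth_type) = false := beq_eq_false_iff_ne.mpr (Ne.symm h2)
    have b3 : ("oauth" == auth_type) = false := beq_eq_false_iff_ne.mpr (Ne.symm h3)
    have b4 : ("api_key" == auth_type) = false := beq_eq_false_iff_ne.mpr (Ne.symm h4)
    have hg : pvRequirements.getD auth_type [] = [] := by
      simp [pvRequirements, PySem.Dict.getD, PySem.Dict.get?, PySem.Dict.ofList,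
            PySem.Dict.update, PySem.Dict.empty, PySem.Dict.insert, b1, b2, b3, b4]
    simp_all [pvCheckFields]
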